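-- pv_equiv track=rewrite | github.com/luke-mino-altherr/ai-music-composer | src/llm_composer/composer.py | _infer_instrument_type
-- ===== SOURCE A (Python) =====
-- def _infer_instrument_type(name: str) -> str:
--     """Infer instrument type from name."""
--     name_lower = name.lower()
--
--     if any(word in name_lower for word in ["piano", "keyboard", "keys"]):
--         return "piano"
--     elif any(word in name_lower for word in ["bass", "low"]):
--         return "bass"
--     elif any(word in name_lower for word in ["drum", "percussion", "beat"]):
--         return "drums"
--     elif any(word in name_lower for word in ["guitar", "string"]):
--         return "guitar"
--     elif any(word in name_lower for word in ["synth", "pad", "lead"]):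
--         return "synthesizer"
--     else:
--         return "unknown"
-- ===== SOURCE B (Python) =====
-- _TYPES = ["piano", "bass", "drums", "guitar", "synthesizer"]
-- _KEYWORDS = [
--     ("piano", 0), ("keyboard", 0), ("keys", 0),
--     ("bass", 1), ("low", 1),
--     ("drum", 2), ("percussion", 2), ("beat", 2),
--     ("guitar", 3), ("string", 3),
--     ("synth", 4), ("pad", 4), ("lead", 4),
-- ]
--
--
-- def _infer_instrument_type(name: str) -> str:
--     """Infer instrument type from name."""
--     name_lower = name.lower()
--     best = len(_TYPES)
--     for word, priority in _KEYWORDS: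
--         if priority < best and word in name_lower:
--             best = priority
--     return _TYPES[best] if best < len(_TYPES) else "unknown"
-- ===== Notes on version B (the rewrite author's own statement) =====
-- stated objective: alternative
-- what changed: Instead of an ordered if/elif chain that short-circuits at the first matching group, B makes one exhaustive accumulator pass over a flat keyword-to-priority list keeping the minimal matched priority, then indexes a type table (or 'unknown' if nothing matched).
import Mathlib
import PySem

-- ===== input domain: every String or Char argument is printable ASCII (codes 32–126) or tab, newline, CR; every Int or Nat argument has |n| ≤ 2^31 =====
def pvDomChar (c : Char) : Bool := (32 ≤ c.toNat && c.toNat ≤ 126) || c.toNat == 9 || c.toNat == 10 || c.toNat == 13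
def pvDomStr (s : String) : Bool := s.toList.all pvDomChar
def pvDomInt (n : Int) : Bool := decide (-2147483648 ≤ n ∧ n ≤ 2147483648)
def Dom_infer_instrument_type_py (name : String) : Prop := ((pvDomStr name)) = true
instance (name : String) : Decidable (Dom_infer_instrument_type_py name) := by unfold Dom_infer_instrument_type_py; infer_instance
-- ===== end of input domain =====

-- B replaces the ordered if/elif short-circuit chain by one exhaustive accumulator pass over a
-- flat keyword→priority list, keeping the minimal matched priority; alternative algorithm, same cost.

-- ===== PORT A =====
def infer_instrument_type_py (name : String) : String :=
  let name_lower := PySem.Str.lower name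
  if ["piano", "keyboard", "keys"].any (fun word => PySem.Str.isIn word name_lower) then
    "piano"
  else if ["bass", "low"].any (fun word => PySem.Str.isIn word name_lower) then
    "bass"
  else if ["drum", "percussion", "beat"].any (fun word => PySem.Str.isIn word name_lower) then
    "drums"
  else if ["guitar", "string"].any (fun word => PySem.Str.isIn word name_lower) then
    "guitar"
  else if ["synth", "pad", "lead"].any (fun word => PySem.Str.isIn word name_lower) then
    "synthesizer"
  else
    "unknown"

-- ===== PORT B =====
def pvTypes : List String := ["piano", "bass", "drums", "guitar", "synthesizer"]

def pvKeywords : List (String × Nat) :=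
  [("piano", 0), ("keyboard", 0), ("keys", 0),
   ("bass", 1), ("low", 1),
   ("drum", 2), ("percussion", 2), ("beat", 2),
   ("guitar", 3), ("string", 3),
   ("synth", 4), ("pad", 4), ("lead", 4)]

def infer_instrument_type_py_alt (name : String) : String :=
  let name_lower := PySem.Str.lower name
  let best := pvKeywords.foldl
    (fun (best : Nat) p => if p.2 < best && PySem.Str.isIn p.1 name_lower then p.2 else best)
    pvTypes.length
  if best < pvTypes.length then pvTypes.getD best "unknown" else "unknown"

-- ===== PRECONDITION & SPEC =====
def Spec_infer_instrument_type_py (name : String) (out : String) : Prop := out = infer_instrument_type_py_alt name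
instance (name : String) (out : String) : Decidable (Spec_infer_instrument_type_py name out) := by unfold Spec_infer_instrument_type_py; infer_instance

-- ===== CLAIM (what is proved, stated in full; the proofs are below) =====
def Claim_equal_infer_instrument_type_py : Prop := ∀ (name : String), Dom_infer_instrument_type_py name → Spec_infer_instrument_type_py name (infer_instrument_type_py name)

-- ===== LEMMAS AND PROOFS =====

-- A's `any` over keywords equals `any id` over the list of membership booleans.
theorem pvAnyMap (nl : String) (l : List String) :
    l.any (fun word => PySem.Str.isIn word nl)
      = (l.map (fun word => PySem.Str.isIn word nl)).any id := by
  induction l with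
  | nil => rfl
  | cons x xs ih => simp [List.any_cons]

-- B's fold over (keyword, priority) pairs equals the same fold over (membership, priority) pairs.
theorem pvFoldMap (nl : String) (l : List (String × Nat)) (init : Nat) :
    l.foldl (fun (best : Nat) p => if p.2 < best && PySem.Str.isIn p.1 nl then p.2 else best) init
      = (l.map (fun p => (PySem.Str.isIn p.1 nl, p.2))).foldl
          (fun (best : Nat) q => if q.2 < best && q.1 then q.2 else best) init := by
  induction l generalizing init with
  | nil => rfl
  | cons x xs ih => simp only [List.foldl_cons, List.map_cons, ih]

-- Both programs, abstracted over the 13 membership tests as free booleans.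
set_option maxHeartbeats 2000000 in
theorem pvKey : ∀ (a b c d e f g h i j k l m : Bool),
    (if [a, b, c].any id then "piano"
     else if [d, e].any id then "bass"
     else if [f, g, h].any id then "drums"
     else if [i, j].any id then "guitar"
     else if [k, l, m].any id then "synthesizer"
     else "unknown")
    =
    (let best := [(a, 0), (b, 0), (c, 0), (d, 1), (e, 1), (f, 2), (g, 2), (h, 2),
                  (i, 3), (j, 3), (k, 4), (l, 4), (m, 4)].foldl
        (fun (best : Nat) q => if q.2 < best && q.1 then q.2 else best) 5
     if best < 5 then (["piano", "bass", "drums", "guitar", "synthesizer"] : List String).getD best "unknown"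
     else "unknown") := by decide

-- ===== VERDICT (by name: the statement is the Claim_ definition above) =====
theorem infer_instrument_type_py_spec : Claim_equal_infer_instrument_type_py := by
  intro name _
  unfold Spec_infer_instrument_type_py infer_instrument_type_py infer_instrument_type_py_alt
    pvKeywords pvTypes
  simp only [pvAnyMap, pvFoldMap, List.map_cons, List.map_nil, List.length_cons,
    List.length_nil, Nat.reduceAdd]
  exact pvKey _ _ _ _ _ _ _ _ _ _ _ _ _
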